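-- pv_equiv track=rewrite | github.com/iliazintchenko/agent-factoring | library/update_best.py | get_siqsB
-- ===== SOURCE A (Python) =====
-- def get_siqsB(digits):
--     if digits < 70:
--         return None
--     params = {70: 8000, 75: 12000, 78: 10000, 80: 15000, 82: 15000,
--               85: 25000, 87: 30000, 90: 40000, 93: 50000, 95: 60000,
--               98: 75000, 100: 90000}
--     best = None
--     for k in sorted(params.keys()):
--         if k <= digits:
--             best = params[k]
--     return best
-- ===== SOURCE B (Python) =====
-- def get_siqsB(digits):
--     # binary search (hand-written bisect_right) over sorted threshold keys,
--     # then one indexed lookup into a parallel values list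
--     keys = [70, 75, 78, 80, 82, 85, 87, 90, 93, 95, 98, 100]
--     vals = [8000, 12000, 10000, 15000, 15000, 25000, 30000,
--             40000, 50000, 60000, 75000, 90000]
--     lo, hi = 0, len(keys)
--     while lo < hi:
--         mid = (lo + hi) // 2
--         if keys[mid] <= digits:
--             lo = mid + 1
--         else:
--             hi = mid
--     return vals[lo - 1] if lo > 0 else None
-- ===== Notes on version B (the rewrite author's own statement) =====
-- stated objective: alternative
-- what changed: Replaces A's guarded linear overwrite-scan over the sorted dict keys by a hand-written binary search (bisect_right) on the sorted key list followed by a single indexed lookup into a parallel values list; A's below-lowest-threshold guard becomes the empty-prefix (lo == 0) case.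
import Mathlib
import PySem

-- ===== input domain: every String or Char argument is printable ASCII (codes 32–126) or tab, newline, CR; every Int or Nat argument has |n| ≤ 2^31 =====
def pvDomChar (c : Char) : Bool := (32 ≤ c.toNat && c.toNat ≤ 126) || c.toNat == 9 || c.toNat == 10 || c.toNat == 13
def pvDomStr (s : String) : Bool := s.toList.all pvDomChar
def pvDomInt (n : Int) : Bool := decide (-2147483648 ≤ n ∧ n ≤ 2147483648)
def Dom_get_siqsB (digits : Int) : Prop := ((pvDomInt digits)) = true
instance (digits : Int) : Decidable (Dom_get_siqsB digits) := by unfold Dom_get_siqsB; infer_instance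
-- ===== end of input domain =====

-- B replaces A's guarded ascending overwrite-scan of the sorted dict keys by a
-- hand-written binary search (bisect_right) over the sorted key list plus one
-- indexed lookup in a parallel values list; objective: alternative algorithm.

-- ===== PORT A =====
def pvParams : PySem.Dict Int Int :=
  PySem.Dict.ofList [(70, 8000), (75, 12000), (78, 10000), (80, 15000), (82, 15000),
                     (85, 25000), (87, 30000), (90, 40000), (93, 50000), (95, 60000),
                     (98, 75000), (100, 90000)]

def get_siqsB (digits : Int) : Option Int :=
  if digits < 70 then none
  else
    (PySem.List.sorted (PySem.Dict.keys pvParams) (fun k => k) false).foldl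
      (fun best k => if k ≤ digits then PySem.Dict.get? pvParams k else best) none

-- ===== PORT B =====
def pvKeys : List Int := [70, 75, 78, 80, 82, 85, 87, 90, 93, 95, 98, 100]
def pvVals : List Int := [8000, 12000, 10000, 15000, 15000, 25000, 30000,
                          40000, 50000, 60000, 75000, 90000]

-- the while-loop of Source B: bisect_right on `keys`; `keys[mid]` is always in range
-- (lo < hi ≤ 12), so plain getD is exact here
def pvBis (d : Int) (keys : List Int) (lo hi : Nat) : Nat :=
  if h : lo < hi then
    let mid := (lo + hi) / 2
    if keys.getD mid 0 ≤ d then pvBis d keys (mid + 1) hi else pvBis d keys lo mid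
  else lo
termination_by hi - lo
decreasing_by all_goals omega

def get_siqsB_alt (digits : Int) : Option Int :=
  let lo := pvBis digits pvKeys 0 pvKeys.length
  -- vals[lo-1] is always in range when lo > 0, so getD is exact
  if lo > 0 then some (pvVals.getD (lo - 1) 0) else none

-- ===== PRECONDITION & SPEC =====
def Spec_get_siqsB (digits : Int) (out : Option Int) : Prop := out = get_siqsB_alt digits
instance (digits : Int) (out : Option Int) : Decidable (Spec_get_siqsB digits out) := by unfold Spec_get_siqsB; infer_instance

-- ===== CLAIM (what is proved, stated in full; the proofs are below) =====
def Claim_equal_get_siqsB : Prop := ∀ (digits : Int), Dom_get_siqsB digits → Spec_get_siqsB digits (get_siqsB digits)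

-- ===== LEMMAS AND PROOFS =====
lemma pvBis_step (d : Int) (keys : List Int) (lo hi : Nat) (h : lo < hi) :
    pvBis d keys lo hi =
      if keys.getD ((lo + hi) / 2) 0 ≤ d then pvBis d keys ((lo + hi) / 2 + 1) hi
      else pvBis d keys lo ((lo + hi) / 2) := by
  rw [pvBis]; simp [h]

lemma pvBis_base (d : Int) (keys : List Int) (lo hi : Nat) (h : ¬ lo < hi) :
    pvBis d keys lo hi = lo := by
  rw [pvBis]; simp [h]

lemma pvSortedKeys :
    PySem.List.sorted (PySem.Dict.keys pvParams) (fun k => k) false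
      = [70, 75, 78, 80, 82, 85, 87, 90, 93, 95, 98, 100] := by decide

-- ===== VERDICT (by name: the statement is the Claim_ definition above) =====
theorem get_siqsB_spec : Claim_equal_get_siqsB := by
  intro d _
  unfold Spec_get_siqsB get_siqsB get_siqsB_alt
  rw [pvSortedKeys]
  simp only [List.foldl]
  simp only [show PySem.Dict.get? pvParams 70 = some 8000 from by decide,
             show PySem.Dict.get? pvParams 75 = some 12000 from by decide,
             show PySem.Dict.get? pvParams 78 = some 10000 from by decide,
             show PySem.Dict.get? pvParams 80 = some 15000 from by decide,
             show PySem.Dict.get? pvParams 82 = some 15000 from by decide,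
             show PySem.Dict.get? pvParams 85 = some 25000 from by decide,
             show PySem.Dict.get? pvParams 87 = some 30000 from by decide,
             show PySem.Dict.get? pvParams 90 = some 40000 from by decide,
             show PySem.Dict.get? pvParams 93 = some 50000 from by decide,
             show PySem.Dict.get? pvParams 95 = some 60000 from by decide,
             show PySem.Dict.get? pvParams 98 = some 75000 from by decide,
             show PySem.Dict.get? pvParams 100 = some 90000 from by decide]
  rw [show pvKeys.length = 12 from rfl]
  rcases (show (d < 70) ∨ (70 ≤ d ∧ d < 75) ∨ (75 ≤ d ∧ d < 78) ∨ (78 ≤ d ∧ d < 80) ∨ (80 ≤ d ∧ d < 82) ∨ (82 ≤ d ∧ d < 85) ∨ (85 ≤ d ∧ d < 87) ∨ (87 ≤ d ∧ d < 90) ∨ (90 ≤ d ∧ d < 93) ∨ (93 ≤ d ∧ d < 95) ∨ (95 ≤ d ∧ d < 98) ∨ (98 ≤ d ∧ d < 100) ∨ (100 ≤ d) from by omega) with h|h|h|h|h|h|h|h|h|h|h|h|h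
  · simp [pvBis_step, pvBis_base, pvKeys, pvVals,
          show d < 70 from by omega,
          show (((70:Int)) ≤ d) = False from by simp; omega,
          show (((75:Int)) ≤ d) = False from by simp; omega,
          show (((78:Int)) ≤ d) = False from by simp; omega,
          show (((80:Int)) ≤ d) = False from by simp; omega,
          show (((82:Int)) ≤ d) = False from by simp; omega,
          show (((85:Int)) ≤ d) = False from by simp; omega,
          show (((87:Int)) ≤ d) = False from by simp; omega,
          show (((90:Int)) ≤ d) = False from by simp; omega,
          show (((93:Int)) ≤ d) = False from by simp; omega,
          show (((95:Int)) ≤ d) = False from by simp; omega,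
          show (((98:Int)) ≤ d) = False from by simp; omega,
          show (((100:Int)) ≤ d) = False from by simp; omega]
  · simp [pvBis_step, pvBis_base, pvKeys, pvVals,
          show ¬ d < 70 from by omega,
          show (((70:Int)) ≤ d) = True from by simp; omega,
          show (((75:Int)) ≤ d) = False from by simp; omega,
          show (((78:Int)) ≤ d) = False from by simp; omega,
          show (((80:Int)) ≤ d) = False from by simp; omega,
          show (((82:Int)) ≤ d) = False from by simp; omega,
          show (((85:Int)) ≤ d) = False from by simp; omega,
          show (((87:Int)) ≤ d) = False from by simp; omega,
          show (((90:Int)) ≤ d) = False from by simp; omega,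
          show (((93:Int)) ≤ d) = False from by simp; omega,
          show (((95:Int)) ≤ d) = False from by simp; omega,
          show (((98:Int)) ≤ d) = False from by simp; omega,
          show (((100:Int)) ≤ d) = False from by simp; omega]
  · simp [pvBis_step, pvBis_base, pvKeys, pvVals,
          show ¬ d < 70 from by omega,
          show (((70:Int)) ≤ d) = True from by simp; omega,
          show (((75:Int)) ≤ d) = True from by simp; omega,
          show (((78:Int)) ≤ d) = False from by simp; omega,
          show (((80:Int)) ≤ d) = False from by simp; omega,
          show (((82:Int)) ≤ d) = False from by simp; omega,
          show (((85:Int)) ≤ d) = False from by simp; omega,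
          show (((87:Int)) ≤ d) = False from by simp; omega,
          show (((90:Int)) ≤ d) = False from by simp; omega,
          show (((93:Int)) ≤ d) = False from by simp; omega,
          show (((95:Int)) ≤ d) = False from by simp; omega,
          show (((98:Int)) ≤ d) = False from by simp; omega,
          show (((100:Int)) ≤ d) = False from by simp; omega]
  · simp [pvBis_step, pvBis_base, pvKeys, pvVals,
          show ¬ d < 70 from by omega,
          show (((70:Int)) ≤ d) = True from by simp; omega,
          show (((75:Int)) ≤ d) = True from by simp; omega,
          show (((78:Int)) ≤ d) = True from by simp; omega,
          show (((80:Int)) ≤ d) = False from by simp; omega,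
          show (((82:Int)) ≤ d) = False from by simp; omega,
          show (((85:Int)) ≤ d) = False from by simp; omega,
          show (((87:Int)) ≤ d) = False from by simp; omega,
          show (((90:Int)) ≤ d) = False from by simp; omega,
          show (((93:Int)) ≤ d) = False from by simp; omega,
          show (((95:Int)) ≤ d) = False from by simp; omega,
          show (((98:Int)) ≤ d) = False from by simp; omega,
          show (((100:Int)) ≤ d) = False from by simp; omega]
  · simp [pvBis_step, pvBis_base, pvKeys, pvVals,
          show ¬ d < 70 from by omega,
          show (((70:Int)) ≤ d) = True from by simp; omega,
          show (((75:Int)) ≤ d) = True from by simp; omega,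
          show (((78:Int)) ≤ d) = True from by simp; omega,
          show (((80:Int)) ≤ d) = True from by simp; omega,
          show (((82:Int)) ≤ d) = False from by simp; omega,
          show (((85:Int)) ≤ d) = False from by simp; omega,
          show (((87:Int)) ≤ d) = False from by simp; omega,
          show (((90:Int)) ≤ d) = False from by simp; omega,
          show (((93:Int)) ≤ d) = False from by simp; omega,
          show (((95:Int)) ≤ d) = False from by simp; omega,
          show (((98:Int)) ≤ d) = False from by simp; omega,
          show (((100:Int)) ≤ d) = False from by simp; omega]
  · simp [pvBis_step, pvBis_base, pvKeys, pvVals,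
          show ¬ d < 70 from by omega,
          show (((70:Int)) ≤ d) = True from by simp; omega,
          show (((75:Int)) ≤ d) = True from by simp; omega,
          show (((78:Int)) ≤ d) = True from by simp; omega,
          show (((80:Int)) ≤ d) = True from by simp; omega,
          show (((82:Int)) ≤ d) = True from by simp; omega,
          show (((85:Int)) ≤ d) = False from by simp; omega,
          show (((87:Int)) ≤ d) = False from by simp; omega,
          show (((90:Int)) ≤ d) = False from by simp; omega,
          show (((93:Int)) ≤ d) = False from by simp; omega,
          show (((95:Int)) ≤ d) = False from by simp; omega,
          show (((98:Int)) ≤ d) = False from by simp; omega,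
          show (((100:Int)) ≤ d) = False from by simp; omega]
  · simp [pvBis_step, pvBis_base, pvKeys, pvVals,
          show ¬ d < 70 from by omega,
          show (((70:Int)) ≤ d) = True from by simp; omega,
          show (((75:Int)) ≤ d) = True from by simp; omega,
          show (((78:Int)) ≤ d) = True from by simp; omega,
          show (((80:Int)) ≤ d) = True from by simp; omega,
          show (((82:Int)) ≤ d) = True from by simp; omega,
          show (((85:Int)) ≤ d) = True from by simp; omega,
          show (((87:Int)) ≤ d) = False from by simp; omega,
          show (((90:Int)) ≤ d) = False from by simp; omega,
          show (((93:Int)) ≤ d) = False from by simp; omega,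
          show (((95:Int)) ≤ d) = False from by simp; omega,
          show (((98:Int)) ≤ d) = False from by simp; omega,
          show (((100:Int)) ≤ d) = False from by simp; omega]
  · simp [pvBis_step, pvBis_base, pvKeys, pvVals,
          show ¬ d < 70 from by omega,
          show (((70:Int)) ≤ d) = True from by simp; omega,
          show (((75:Int)) ≤ d) = True from by simp; omega,
          show (((78:Int)) ≤ d) = True from by simp; omega,
          show (((80:Int)) ≤ d) = True from by simp; omega,
          show (((82:Int)) ≤ d) = True from by simp; omega,
          show (((85:Int)) ≤ d) = True from by simp; omega,
          show (((87:Int)) ≤ d) = True from by simp; omega,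
          show (((90:Int)) ≤ d) = False from by simp; omega,
          show (((93:Int)) ≤ d) = False from by simp; omega,
          show (((95:Int)) ≤ d) = False from by simp; omega,
          show (((98:Int)) ≤ d) = False from by simp; omega,
          show (((100:Int)) ≤ d) = False from by simp; omega]
  · simp [pvBis_step, pvBis_base, pvKeys, pvVals,
          show ¬ d < 70 from by omega,
          show (((70:Int)) ≤ d) = True from by simp; omega,
          show (((75:Int)) ≤ d) = True from by simp; omega,
          show (((78:Int)) ≤ d) = True from by simp; omega,
          show (((80:Int)) ≤ d) = True from by simp; omega,
          show (((82:Int)) ≤ d) = True from by simp; omega,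
          show (((85:Int)) ≤ d) = True from by simp; omega,
          show (((87:Int)) ≤ d) = True from by simp; omega,
          show (((90:Int)) ≤ d) = True from by simp; omega,
          show (((93:Int)) ≤ d) = False from by simp; omega,
          show (((95:Int)) ≤ d) = False from by simp; omega,
          show (((98:Int)) ≤ d) = False from by simp; omega,
          show (((100:Int)) ≤ d) = False from by simp; omega]
  · simp [pvBis_step, pvBis_base, pvKeys, pvVals,
          show ¬ d < 70 from by omega,
          show (((70:Int)) ≤ d) = True from by simp; omega,
          show (((75:Int)) ≤ d) = True from by simp; omega,
          show (((78:Int)) ≤ d) = True from by simp; omega,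
          show (((80:Int)) ≤ d) = True from by simp; omega,
          show (((82:Int)) ≤ d) = True from by simp; omega,
          show (((85:Int)) ≤ d) = True from by simp; omega,
          show (((87:Int)) ≤ d) = True from by simp; omega,
          show (((90:Int)) ≤ d) = True from by simp; omega,
          show (((93:Int)) ≤ d) = True from by simp; omega,
          show (((95:Int)) ≤ d) = False from by simp; omega,
          show (((98:Int)) ≤ d) = False from by simp; omega,
          show (((100:Int)) ≤ d) = False from by simp; omega]
  · simp [pvBis_step, pvBis_base, pvKeys, pvVals,
          show ¬ d < 70 from by omega,
          show (((70:Int)) ≤ d) = True from by simp; omega,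
          show (((75:Int)) ≤ d) = True from by simp; omega,
          show (((78:Int)) ≤ d) = True from by simp; omega,
          show (((80:Int)) ≤ d) = True from by simp; omega,
          show (((82:Int)) ≤ d) = True from by simp; omega,
          show (((85:Int)) ≤ d) = True from by simp; omega,
          show (((87:Int)) ≤ d) = True from by simp; omega,
          show (((90:Int)) ≤ d) = True from by simp; omega,
          show (((93:Int)) ≤ d) = True from by simp; omega,
          show (((95:Int)) ≤ d) = True from by simp; omega,
          show (((98:Int)) ≤ d) = False from by simp; omega,
          show (((100:Int)) ≤ d) = False from by simp; omega]
  · simp [pvBis_step, pvBis_base, pvKeys, pvVals,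
          show ¬ d < 70 from by omega,
          show (((70:Int)) ≤ d) = True from by simp; omega,
          show (((75:Int)) ≤ d) = True from by simp; omega,
          show (((78:Int)) ≤ d) = True from by simp; omega,
          show (((80:Int)) ≤ d) = True from by simp; omega,
          show (((82:Int)) ≤ d) = True from by simp; omega,
          show (((85:Int)) ≤ d) = True from by simp; omega,
          show (((87:Int)) ≤ d) = True from by simp; omega,
          show (((90:Int)) ≤ d) = True from by simp; omega,
          show (((93:Int)) ≤ d) = True from by simp; omega,
          show (((95:Int)) ≤ d) = True from by simp; omega,
          show (((98:Int)) ≤ d) = True from by simp; omega,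
          show (((100:Int)) ≤ d) = False from by simp; omega]
  · simp [pvBis_step, pvBis_base, pvKeys, pvVals,
          show ¬ d < 70 from by omega,
          show (((70:Int)) ≤ d) = True from by simp; omega,
          show (((75:Int)) ≤ d) = True from by simp; omega,
          show (((78:Int)) ≤ d) = True from by simp; omega,
          show (((80:Int)) ≤ d) = True from by simp; omega,
          show (((82:Int)) ≤ d) = True from by simp; omega,
          show (((85:Int)) ≤ d) = True from by simp; omega,
          show (((87:Int)) ≤ d) = True from by simp; omega,
          show (((90:Int)) ≤ d) = True from by simp; omega,
          show (((93:Int)) ≤ d) = True from by simp; omega,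
          show (((95:Int)) ≤ d) = True from by simp; omega,
          show (((98:Int)) ≤ d) = True from by simp; omega,
          show (((100:Int)) ≤ d) = True from by simp; omega]
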